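-- pv_equiv track=rewrite | github.com/Tonitum/advent-of-code | day2/day2.py | get_game_power
-- ===== SOURCE A (Python) =====
-- def get_game_power(game_string: str) -> int:
--     # split the game into rounds
--     split_rounds = game_string.split(";")
--     # determine the largest count for each color
--     red_max: int = -1
--     green_max: int = -1
--     blue_max: int = -1
--     for game_round in split_rounds:
--         game_round = game_round.strip()
--         # split the game round by colors
--         round_colors = game_round.split(",")
--         for color in round_colors:
--             parts = color.strip().split(" ")
--             count = parts[0]
--             color_name = parts[1]
--             if color_name == "blue":
--                 if blue_max <= int(count):
--                     blue_max = int(count)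
--             if color_name == "red":
--                 if red_max <= int(count):
--                     red_max = int(count)
--             if color_name == "green":
--                 if green_max <= int(count):
--                     green_max = int(count)
--     # multiple the largest of each color together
--     game_power: int = red_max * blue_max * green_max
--     return game_power
-- ===== SOURCE B (Python) =====
-- def get_game_power(game_string: str) -> int:
--     # Collect (color, count) pairs in one tokenizing pass, then reduce:
--     # each per-color maximum is max over the list seeded with -1.
--     pairs = []
--     for game_round in game_string.split(";"):
--         for color in game_round.strip().split(","):
--             parts = color.strip().split(" ")
--             name = parts[1]
--             if name in ("red", "green", "blue"):
--                 pairs.append((name, int(parts[0])))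
--     red_max = max([-1] + [v for n, v in pairs if n == "red"])
--     blue_max = max([-1] + [v for n, v in pairs if n == "blue"])
--     green_max = max([-1] + [v for n, v in pairs if n == "green"])
--     return red_max * blue_max * green_max
-- ===== Notes on version B (the rewrite author's own statement) =====
-- stated objective: alternative
-- what changed: A threads three running-max accumulators through the token loop; B collects all (color,count) pairs in one tokenizing pass and then reduces each color's maximum over its collected list seeded with -1.
import Mathlib
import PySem

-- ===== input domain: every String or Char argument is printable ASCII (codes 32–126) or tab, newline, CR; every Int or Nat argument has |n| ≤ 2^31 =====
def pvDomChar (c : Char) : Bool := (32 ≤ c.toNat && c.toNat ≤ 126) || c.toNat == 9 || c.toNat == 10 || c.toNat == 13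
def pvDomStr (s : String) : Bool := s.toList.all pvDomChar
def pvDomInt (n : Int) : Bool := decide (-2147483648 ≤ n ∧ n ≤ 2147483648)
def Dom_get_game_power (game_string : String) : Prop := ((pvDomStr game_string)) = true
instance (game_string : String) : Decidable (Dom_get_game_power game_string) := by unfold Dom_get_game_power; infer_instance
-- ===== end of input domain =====

-- B replaces A's three running-max accumulators by a collect-pairs-then-per-color-max
-- reduction over the same tokenization (alternative decomposition, same cost).

-- s.split(sep) for nonempty sep (both programs only split on ";", "," and " ")
def pvSplit (s sep : String) : List String := (PySem.Str.split? s sep).getD []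

-- ===== PORT A =====
-- loop body of A's inner 'for color in round_colors' (ifs in A's order: blue, red, green);
-- state is (red_max, green_max, blue_max). int(count) is hoisted with default 0: inside
-- Pre_ it is only read in the branches where A parses it.
def pvStepA (st : Int × Int × Int) (color : String) : Int × Int × Int :=
  let parts := pvSplit (PySem.Str.strip color) " "
  let count := (PySem.List.pyGet? parts 0).getD ""
  let color_name := (PySem.List.pyGet? parts 1).getD ""
  let n := (PySem.Int.ofStr? count).getD 0
  let st := if color_name = "blue" then (if st.2.2 ≤ n then (st.1, st.2.1, n) else st) else st
  let st := if color_name = "red" then (if st.1 ≤ n then (n, st.2.1, st.2.2) else st) else st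
  if color_name = "green" then (if st.2.1 ≤ n then (st.1, n, st.2.2) else st) else st

def get_game_power (game_string : String) : Int :=
  let split_rounds := pvSplit game_string ";"
  let st := split_rounds.foldl
    (fun st game_round => (pvSplit (PySem.Str.strip game_round) ",").foldl pvStepA st)
    ((-1 : Int), (-1 : Int), (-1 : Int))
  st.1 * st.2.2 * st.2.1

-- ===== PORT B =====
-- loop body of B's collecting pass: append (name, int(parts[0])) when name is a known color
def pvStepB (acc : List (String × Int)) (color : String) : List (String × Int) :=
  let parts := pvSplit (PySem.Str.strip color) " "
  let name := (PySem.List.pyGet? parts 1).getD ""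
  if name = "red" ∨ name = "green" ∨ name = "blue" then
    acc ++ [(name, (PySem.Int.ofStr? ((PySem.List.pyGet? parts 0).getD "")).getD 0)]
  else acc

-- max([-1] + vs) on Int is vs.foldl max (-1)
def get_game_power_alt (game_string : String) : Int :=
  let pairs := (pvSplit game_string ";").foldl
    (fun acc game_round => (pvSplit (PySem.Str.strip game_round) ",").foldl pvStepB acc) []
  let m := fun (c : String) => ((pairs.filter (fun p => p.1 == c)).map (·.2)).foldl max (-1 : Int)
  m "red" * m "blue" * m "green"

-- ===== PRECONDITION & SPEC =====
-- a token is fine iff it has a second word (else A's parts[1] raises IndexError) and,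
-- when that word names a color, its first word parses as an int (else A raises ValueError)
def pvTokOK (parts : List String) : Bool :=
  match parts with
  | p0 :: p1 :: _ =>
      if p1 == "red" || p1 == "green" || p1 == "blue"
      then (PySem.Int.ofStr? p0).isSome else true
  | _ => false

-- Pre_ excludes exactly the inputs on which Python A raises (IndexError/ValueError above)
def Pre_get_game_power (game_string : String) : Prop :=
  ∀ r ∈ pvSplit game_string ";", ∀ c ∈ pvSplit (PySem.Str.strip r) ",",
    pvTokOK (pvSplit (PySem.Str.strip c) " ") = true

instance (game_string : String) : Decidable (Pre_get_game_power game_string) := by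
  unfold Pre_get_game_power; infer_instance

def pvWitness_get_game_power : String := "1 red, 2 blue; 3 green"

def Spec_get_game_power (game_string : String) (out : Int) : Prop := out = get_game_power_alt game_string
instance (game_string : String) (out : Int) : Decidable (Spec_get_game_power game_string out) := by unfold Spec_get_game_power; infer_instance

-- ===== CLAIM (what is proved, stated in full; the proofs are below) =====
def Claim_equal_get_game_power : Prop := ∀ (game_string : String), Dom_get_game_power game_string → Pre_get_game_power game_string → Spec_get_game_power game_string (get_game_power game_string)

-- ===== LEMMAS AND PROOFS =====

-- the counts B collected for color c
def pvVals (c : String) (ps : List (String × Int)) : List Int :=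
  (ps.filter (fun p => p.1 == c)).map (·.2)

theorem pvVals_append (c : String) (a b : List (String × Int)) :
    pvVals c (a ++ b) = pvVals c a ++ pvVals c b := by
  simp [pvVals]

theorem pvStepB_append (acc : List (String × Int)) (t : String) :
    pvStepB acc t = acc ++ pvStepB [] t := by
  simp only [pvStepB]
  split
  · simp only [List.nil_append]
  · simp only [List.append_nil]

theorem foldl_pvStepB_append (toks : List String) :
    ∀ acc, toks.foldl pvStepB acc = acc ++ toks.foldl pvStepB [] := by
  induction toks with
  | nil => simp
  | cons t ts ih =>
      intro acc
      simp only [List.foldl_cons]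
      rw [ih (pvStepB acc t), ih (pvStepB [] t), pvStepB_append acc t, List.append_assoc]

-- one token: A's triple update is the per-color foldl-max over B's collected pairs
theorem pvStepA_char (r g b : Int) (t : String) :
    pvStepA (r, g, b) t =
      ((pvVals "red" (pvStepB [] t)).foldl max r,
       (pvVals "green" (pvStepB [] t)).foldl max g,
       (pvVals "blue" (pvStepB [] t)).foldl max b) := by
  simp only [pvStepA, pvStepB, pvVals]
  set name := (PySem.List.pyGet? (pvSplit (PySem.Str.strip t) " ") 1).getD "" with hname
  set n := (PySem.Int.ofStr? ((PySem.List.pyGet? (pvSplit (PySem.Str.strip t) " ") 0).getD "")).getD 0 with hn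
  by_cases hr : name = "red"
  · rw [hr]; simp [max_def]; split_ifs <;> rfl
  · by_cases hg : name = "green"
    · rw [hg]; simp [max_def]; split_ifs <;> rfl
    · by_cases hb : name = "blue"
      · rw [hb]; simp [max_def]; split_ifs <;> rfl
      · simp [hr, hg, hb]

theorem pv_main (toks : List String) :
    ∀ r g b : Int, toks.foldl pvStepA (r, g, b) =
      ((pvVals "red" (toks.foldl pvStepB [])).foldl max r,
       (pvVals "green" (toks.foldl pvStepB [])).foldl max g,
       (pvVals "blue" (toks.foldl pvStepB [])).foldl max b) := by
  induction toks with
  | nil => intro r g b; simp [pvVals]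
  | cons t ts ih =>
      intro r g b
      simp only [List.foldl_cons]
      rw [pvStepA_char, ih, foldl_pvStepB_append ts (pvStepB [] t)]
      simp [pvVals_append, List.foldl_append]

-- a nested foldl over rounds/colors is a foldl over the flattened token list
theorem pv_foldl_flat {σ : Type} (step : σ → String → σ) (g : String → List String) :
    ∀ (l : List String) (init : σ),
      l.foldl (fun s a => (g a).foldl step s) init = (l.flatMap g).foldl step init := by
  intro l
  induction l with
  | nil => intro init; simp
  | cons a as ih => intro init; simp [List.foldl_append, ih]

-- ===== VERDICT (by name: the statement is the Claim_ definition above) =====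
theorem get_game_power_spec : Claim_equal_get_game_power := by
  intro s _ _
  unfold Spec_get_game_power
  simp only [get_game_power, get_game_power_alt]
  rw [pv_foldl_flat pvStepA (fun gr => pvSplit (PySem.Str.strip gr) ","),
      pv_foldl_flat pvStepB (fun gr => pvSplit (PySem.Str.strip gr) ","),
      pv_main]
  simp only [pvVals]
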